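-- pv_equiv track=rewrite | github.com/DanNov99/cookiecutter-pypackage | kata_3/src/kata_3/ATM.py | atm_withdrow
-- ===== SOURCE A (Python) =====
-- def atm_withdrow(amount: int):
--     if amount <= 0 or amount > 1500 or (amount % 10) != 0:
--         return -1
--
--     possible_banknotes = [10, 20, 50, 100, 200, 500]
--     if amount in possible_banknotes:
--         return 1
--
--     counter = 0
--     for banknote in reversed(possible_banknotes):
--         q, mod = divmod(amount, banknote)
--
--         counter += q
--         amount = mod
--
--     return counter
-- ===== SOURCE B (Python) =====
-- def atm_withdrow(amount: int):
--     if amount <= 0 or amount > 1500 or amount % 10 != 0: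
--         return -1
--     denoms = [10, 20, 50, 100, 200, 500]
--     dp = [0]
--     for v in range(10, amount + 10, 10):
--         dp.append(1 + min(dp[(v - d) // 10] for d in denoms if d <= v))
--     return dp[amount // 10]
-- ===== Notes on version B (the rewrite author's own statement) =====
-- stated objective: alternative
-- what changed: Replaces the greedy reversed-denomination pass with a bottom-up dynamic-programming table dp indexed by dispensable value, taking a minimum over the denominations at each step; identical results because this denomination set is canonical (greedy is optimal).
import Mathlib
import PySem

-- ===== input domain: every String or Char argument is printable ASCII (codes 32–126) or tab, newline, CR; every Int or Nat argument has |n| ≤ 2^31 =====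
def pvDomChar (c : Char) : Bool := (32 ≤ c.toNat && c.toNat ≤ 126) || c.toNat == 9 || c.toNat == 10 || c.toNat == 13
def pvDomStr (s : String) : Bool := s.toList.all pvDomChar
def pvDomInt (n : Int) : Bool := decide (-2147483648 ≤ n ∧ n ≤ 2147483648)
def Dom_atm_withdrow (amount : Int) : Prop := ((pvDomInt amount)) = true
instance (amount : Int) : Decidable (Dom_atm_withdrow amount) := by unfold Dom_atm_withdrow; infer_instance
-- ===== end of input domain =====

-- B replaces A's greedy pass with a bottom-up DP over multiples of 10 (alternative decomposition; same results since this denomination set is canonical).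

-- ===== PORT A =====
def atm_withdrow (amount : Int) : Int :=
  if amount ≤ 0 ∨ 1500 < amount ∨ PySem.Int.mod amount 10 ≠ 0 then -1
  else
    let possible_banknotes : List Int := [10, 20, 50, 100, 200, 500]
    if amount ∈ possible_banknotes then 1
    else
      -- for banknote in reversed(possible_banknotes): q, mod = divmod(amount, banknote); counter += q; amount = mod
      let st := possible_banknotes.reverse.foldl
        (fun (st : Int × Int) banknote =>
          (st.1 + PySem.Int.floordiv st.2 banknote, PySem.Int.mod st.2 banknote))
        (0, amount)
      st.1

-- ===== PORT B =====
def atm_withdrow_alt (amount : Int) : Int :=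
  if amount ≤ 0 ∨ 1500 < amount ∨ PySem.Int.mod amount 10 ≠ 0 then -1
  else
    let denoms : List Int := [10, 20, 50, 100, 200, 500]
    let dp := (PySem.List.pyRange 10 (amount + 10) 10).foldl
      (fun (dp : List Int) v =>
        -- min(dp[(v-d)//10] for d in denoms if d <= v): the generator is nonempty (10 ≤ v)
        -- and every index (v-d)//10 is a valid nonnegative index into dp, so getD/min?.getD are exact here
        let cands := (denoms.filter (fun d => decide (d ≤ v))).map
          (fun d => dp.getD (PySem.Int.floordiv (v - d) 10).toNat 0)
        dp ++ [1 + ((PySem.List.min? cands (fun x => x)).getD 0)])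
      [0]
    dp.getD (PySem.Int.floordiv amount 10).toNat 0

-- ===== PRECONDITION & SPEC =====
def Spec_atm_withdrow (amount : Int) (out : Int) : Prop := out = atm_withdrow_alt amount
instance (amount : Int) (out : Int) : Decidable (Spec_atm_withdrow amount out) := by unfold Spec_atm_withdrow; infer_instance

-- ===== CLAIM (what is proved, stated in full; the proofs are below) =====
def Claim_equal_atm_withdrow : Prop := ∀ (amount : Int), Dom_atm_withdrow amount → Spec_atm_withdrow amount (atm_withdrow amount)

-- ===== LEMMAS AND PROOFS =====

-- the valid amounts are exactly 10*(k+1) for k < 150; check each by kernel evaluation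
set_option maxHeartbeats 4000000 in
set_option maxRecDepth 10000 in
theorem atm_valid_cases : ∀ k : Fin 150, atm_withdrow (10 * ((k : Int) + 1)) = atm_withdrow_alt (10 * ((k : Int) + 1)) := by decide

-- ===== VERDICT (by name: the statement is the Claim_ definition above) =====
theorem atm_withdrow_spec : Claim_equal_atm_withdrow := by
  intro amount _
  unfold Spec_atm_withdrow
  by_cases h : amount ≤ 0 ∨ 1500 < amount ∨ PySem.Int.mod amount 10 ≠ 0
  · simp only [atm_withdrow, atm_withdrow_alt, if_pos h]
  · push Not at h
    obtain ⟨h1, h2, h3⟩ := h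
    have hm : amount % 10 = 0 := by
      have := h3
      simp [PySem.Int.mod, Int.fmod_eq_emod] at this
      omega
    have hk : ∃ k : Fin 150, amount = 10 * ((k : Int) + 1) := by
      refine ⟨⟨(amount / 10 - 1).toNat, by omega⟩, by push_cast; omega⟩
    obtain ⟨k, rfl⟩ := hk
    exact atm_valid_cases k
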